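-- pv_equiv track=rewrite | github.com/FurkanGozukara/SECourses_Musubi_Trainer | musubi_tuner_gui/wan_lora_gui.py | upsert_parameter
-- ===== SOURCE A (Python) =====
-- def upsert_parameter(parameters, key: str, value):
--     """Return a new parameter list where `key` is set to `value` exactly once."""
--     updated: list[tuple] = []
--     replaced = False
--     for k, v in parameters:
--         if k == key:
--             if not replaced:
--                 updated.append((k, value))
--                 replaced = True
--             # Skip duplicate instances of the same key
--         else:
--             updated.append((k, v))
--
--     if not replaced:
--         updated.append((key, value))
--
--     return updated
-- ===== SOURCE B (Python) =====
-- def upsert_parameter(parameters, key: str, value):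
--     """Return a new parameter list where `key` is set to `value` exactly once."""
--     result = [(k, v) for k, v in parameters if k != key]
--     idx = next((i for i, (k, _) in enumerate(parameters) if k == key), None)
--     if idx is None:
--         result.append((key, value))
--     else:
--         result.insert(idx, (key, value))
--     return result
-- ===== Notes on version B (the rewrite author's own statement) =====
-- stated objective: alternative
-- what changed: Replaces the single accumulate-with-flag loop by a filter pass that drops all occurrences of the key plus a separate first-index lookup, inserting the new pair at that index (or appending when absent).
import Mathlib
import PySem

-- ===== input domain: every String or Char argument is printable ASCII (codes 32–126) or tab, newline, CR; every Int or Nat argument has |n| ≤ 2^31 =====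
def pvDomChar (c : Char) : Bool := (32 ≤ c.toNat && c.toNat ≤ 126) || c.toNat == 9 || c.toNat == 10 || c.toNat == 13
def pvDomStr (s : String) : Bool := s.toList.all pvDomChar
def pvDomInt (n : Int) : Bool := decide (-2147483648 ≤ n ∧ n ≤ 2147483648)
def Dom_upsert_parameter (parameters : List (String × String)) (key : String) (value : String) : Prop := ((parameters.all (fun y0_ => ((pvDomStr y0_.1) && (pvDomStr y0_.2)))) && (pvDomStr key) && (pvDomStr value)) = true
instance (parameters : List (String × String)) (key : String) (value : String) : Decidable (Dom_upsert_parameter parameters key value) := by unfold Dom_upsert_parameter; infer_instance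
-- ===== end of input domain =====

-- B replaces A's accumulate-with-flag loop by a filter pass plus a first-index lookup and insert (alternative decomposition, same cost).


-- ===== PORT A =====
-- the for-loop with the `replaced` flag, fused with the trailing `if not replaced: append`
def upsertA_go (key value : String) : List (String × String) → Bool → List (String × String)
  | [], replaced => if replaced then [] else [(key, value)]
  | (k, v) :: rest, replaced =>
    if k == key then
      if !replaced then (k, value) :: upsertA_go key value rest true
      else upsertA_go key value rest replaced
    else (k, v) :: upsertA_go key value rest replaced

def upsert_parameter (parameters : List (String × String)) (key : String) (value : String) : List (String × String) :=
  upsertA_go key value parameters false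

-- ===== PORT B =====
def upsert_parameter_alt (parameters : List (String × String)) (key : String) (value : String) : List (String × String) :=
  let result := parameters.filter (fun p => p.1 != key)
  match List.findIdx? (fun p => p.1 == key) parameters with
  | none => result ++ [(key, value)]
  | some i => PySem.List.insert result (i : Int) (key, value)

-- ===== PRECONDITION & SPEC =====
def Spec_upsert_parameter (parameters : List (String × String)) (key : String) (value : String) (out : List (String × String)) : Prop := out = upsert_parameter_alt parameters key value
instance (parameters : List (String × String)) (key : String) (value : String) (out : List (String × String)) : Decidable (Spec_upsert_parameter parameters key value out) := by unfold Spec_upsert_parameter; infer_instance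

-- ===== CLAIM (what is proved, stated in full; the proofs are below) =====
def Claim_equal_upsert_parameter : Prop := ∀ (parameters : List (String × String)) (key : String) (value : String), Dom_upsert_parameter parameters key value → Spec_upsert_parameter parameters key value (upsert_parameter parameters key value)

-- ===== LEMMAS AND PROOFS =====

-- once the flag is set, the loop simply keeps the non-key pairs
theorem upsertA_go_true (key value : String) (l : List (String × String)) :
    upsertA_go key value l true = l.filter (fun p => p.1 != key) := by
  induction l with
  | nil => simp [upsertA_go]
  | cons a rest ih =>
    obtain ⟨k, v⟩ := a
    by_cases h : k == key <;> simp [upsertA_go, h, bne, ih]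

-- the first index of the key bounds the length of the non-key filter
theorem findIdx?_le_filter_length {α : Type} (p : α → Bool) (l : List α) (i : Nat)
    (h : List.findIdx? p l = some i) : i ≤ (l.filter (fun x => !(p x))).length := by
  induction l generalizing i with
  | nil => simp at h
  | cons a rest ih =>
    rw [List.findIdx?_cons] at h
    by_cases ha : p a
    · simp [ha] at h; omega
    · simp [ha] at h
      obtain ⟨j, hj, rfl⟩ := h
      have := ih j hj
      simp [ha]
      omega

theorem upsert_parameter_eq_alt (parameters : List (String × String)) (key value : String) :
    upsert_parameter parameters key value = upsert_parameter_alt parameters key value := by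
  unfold upsert_parameter upsert_parameter_alt
  induction parameters with
  | nil => rfl
  | cons a rest ih =>
    obtain ⟨k, v⟩ := a
    by_cases h : k == key
    · have hk : k = key := by simpa using h
      simp only [upsertA_go, h, if_true, Bool.not_false, List.findIdx?_cons, List.filter_cons, bne,
        Bool.not_true]
      simp [hk, upsertA_go_true, PySem.List.insert_zero, bne]
    · have hb : ((k, v) : String × String).1 != key := by simp [bne, h]
      cases hfind : List.findIdx? (fun p => p.1 == key) rest with
      | none =>
        rw [hfind] at ih
        simp only at ih
        simp [upsertA_go, h, List.findIdx?_cons, hfind, hb, ih]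
      | some i =>
        rw [hfind] at ih
        simp only at ih
        have hle : i ≤ (rest.filter (fun p => p.1 != key)).length := by
          have := findIdx?_le_filter_length (fun p => p.1 == key) rest i hfind
          simpa [bne] using this
        rw [PySem.List.insert_natCast _ _ _ hle] at ih
        simp only [upsertA_go, h, List.findIdx?_cons, hfind, List.filter_cons, hb, if_true,
          Bool.false_eq_true, if_false, Option.map_some]
        have hle2 : i + 1 ≤ ((k, v) :: rest.filter (fun p => p.1 != key)).length := by
          simp; omega
        rw [show ((↑(i + 1) : Int)) = ((i + 1 : Nat) : Int) by push_cast; ring]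
        rw [PySem.List.insert_natCast _ _ _ hle2]
        simp [List.take_succ_cons, List.drop_succ_cons, ih]

-- ===== VERDICT (by name: the statement is the Claim_ definition above) =====
theorem upsert_parameter_spec : Claim_equal_upsert_parameter := by
  intro parameters key value _
  unfold Spec_upsert_parameter
  exact upsert_parameter_eq_alt parameters key value
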